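-- pv_equiv track=rewrite | github.com/jss367/py-overlord | tests/test_base_intrigue_cards.py | _parse_kingdom_config
-- ===== SOURCE A (Python) =====
-- def _parse_kingdom_config(text: str) -> tuple[list[str], dict[str, list[str]]]:
--     default_cards: list[str] = []
--     alternatives: dict[str, list[str]] = {}
--     current_list: list[str] | None = None
--     current_alt: str | None = None
--     in_alternatives = False
--
--     for raw_line in text.splitlines():
--         if not raw_line.strip() or raw_line.lstrip().startswith("#"):
--             continue
--
--         if not raw_line.startswith(" "):
--             current_list = None
--             current_alt = None
--             in_alternatives = raw_line.strip().startswith("alternative_kingdoms:")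
--             if raw_line.strip().startswith("kingdom_cards:"):
--                 current_list = default_cards
--                 in_alternatives = False
--             continue
--
--         if not in_alternatives and raw_line.strip().startswith("- "):
--             card_name = raw_line.strip()[2:].strip().strip('"')
--             default_cards.append(card_name)
--             continue
--
--         if in_alternatives:
--             if raw_line.startswith("  ") and not raw_line.startswith("    "):
--                 # Name of the alternative kingdom
--                 current_alt = raw_line.strip()[:-1]
--                 alternatives[current_alt] = []
--                 current_list = alternatives[current_alt]
--                 continue
--
--             if raw_line.strip().startswith("- ") and current_list is not None:
--                 card_name = raw_line.strip()[2:].strip().strip('"')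
--                 current_list.append(card_name)
--
--     return default_cards, alternatives
-- ===== SOURCE B (Python) =====
-- def _parse_kingdom_config(text: str) -> tuple[list[str], dict[str, list[str]]]:
--     # Two-pass grouped parse: first partition the meaningful lines into top-level
--     # sections (each headed by a non-indented line; the preamble is a non-alt
--     # section), then harvest default cards from every non-alternative section and
--     # parse each alternative_kingdoms section on its own.
--     lines = [l for l in text.splitlines()
--              if l.strip() and not l.lstrip().startswith("#")]
--     sections: list[tuple[bool, list[str]]] = []
--     flag, body = False, []
--     for line in lines:
--         if not line.startswith(" "):
--             sections.append((flag, body))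
--             flag = line.strip().startswith("alternative_kingdoms:")
--             body = []
--         else:
--             body.append(line)
--     sections.append((flag, body))
--
--     default_cards = [_card(line)
--                      for is_alt, body in sections if not is_alt
--                      for line in body if line.strip().startswith("- ")]
--
--     alternatives: dict[str, list[str]] = {}
--     for is_alt, body in sections:
--         if is_alt:
--             _parse_alt_section(body, alternatives)
--     return default_cards, alternatives
--
--
-- def _card(line: str) -> str:
--     return line.strip()[2:].strip().strip('"')
--
--
-- def _parse_alt_section(body: list[str], alternatives: dict[str, list[str]]) -> None:
--     current: str | None = None
--     for line in body:
--         if line.startswith("  ") and not line.startswith("    "):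
--             current = line.strip()[:-1]
--             alternatives[current] = []
--         elif line.strip().startswith("- ") and current is not None:
--             alternatives[current].append(_card(line))
-- ===== Notes on version B (the rewrite author's own statement) =====
-- stated objective: alternative
-- what changed: Replaces A's one-pass five-variable state machine with a two-pass grouped parse: the meaningful lines are first partitioned into top-level sections (preamble and each non-indented header), then default cards are harvested from every non-alternative section by a comprehension and each alternative_kingdoms section is parsed on its own.
import Mathlib
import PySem

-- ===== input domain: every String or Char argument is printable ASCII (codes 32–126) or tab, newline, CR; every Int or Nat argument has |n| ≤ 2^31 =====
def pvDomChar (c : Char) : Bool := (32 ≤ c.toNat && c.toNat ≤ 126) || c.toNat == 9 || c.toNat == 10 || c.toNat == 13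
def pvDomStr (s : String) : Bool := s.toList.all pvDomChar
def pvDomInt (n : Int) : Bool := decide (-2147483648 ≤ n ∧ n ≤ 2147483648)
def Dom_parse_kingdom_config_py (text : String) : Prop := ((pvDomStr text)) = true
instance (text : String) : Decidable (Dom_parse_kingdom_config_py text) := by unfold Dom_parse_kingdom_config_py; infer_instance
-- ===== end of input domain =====

-- B re-decomposes A's one-pass five-variable state machine as a two-pass grouped parse
-- (partition the meaningful lines into top-level sections, then harvest each section);
-- objective: alternative decomposition, same asymptotic cost. Return-value equivalence
-- (A mutates only its own fresh locals, so there are no observable side effects).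

-- ===== PORT A =====
-- A's loop state: (default_cards, alternatives, current_list, in_alternatives).
-- current_list is a Python alias: none = None, some none = default_cards,
-- some (some nm) = alternatives[nm]; appending through the alias is modelled by
-- Dict.modify (exact: the alias always denotes the dict's current entry for nm,
-- because every rebinding of alternatives[nm] also rebinds current_list).
-- current_alt is only ever read as alternatives[current_alt] = current_list's target,
-- so it is carried inside the alias and not duplicated.
def pvA_step (st : List String × PySem.Dict String (List String) × Option (Option String) × Bool)
    (l : String) : List String × PySem.Dict String (List String) × Option (Option String) × Bool :=
  match st with
  | (d, alts, cl, ia) =>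
    if (PySem.Str.strip l == "") || PySem.Str.startswith (PySem.Str.lstrip l) "#" then
      (d, alts, cl, ia)
    else if !(PySem.Str.startswith l " ") then
      -- current_list := None; current_alt := None; in_alternatives := startswith "alternative_kingdoms:";
      -- then the kingdom_cards: test overrides both
      if PySem.Str.startswith (PySem.Str.strip l) "kingdom_cards:" then (d, alts, some none, false)
      else (d, alts, none, PySem.Str.startswith (PySem.Str.strip l) "alternative_kingdoms:")
    else if !ia && PySem.Str.startswith (PySem.Str.strip l) "- " then
      (d ++ [PySem.Str.stripChars (PySem.Str.strip (PySem.Str.slice (PySem.Str.strip l) (some 2) none)) "\""], alts, cl, ia)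
    else if ia then
      if PySem.Str.startswith l "  " && !(PySem.Str.startswith l "    ") then
        (d, alts.insert (PySem.Str.slice (PySem.Str.strip l) none (some (-1))) [],
         some (some (PySem.Str.slice (PySem.Str.strip l) none (some (-1)))), ia)
      else if PySem.Str.startswith (PySem.Str.strip l) "- " then
        match cl with
        | none => (d, alts, cl, ia)
        | some none => (d ++ [PySem.Str.stripChars (PySem.Str.strip (PySem.Str.slice (PySem.Str.strip l) (some 2) none)) "\""], alts, cl, ia)
        | some (some nm) => (d, alts.modify nm [] (· ++ [PySem.Str.stripChars (PySem.Str.strip (PySem.Str.slice (PySem.Str.strip l) (some 2) none)) "\""]), cl, ia)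
      else (d, alts, cl, ia)
    else (d, alts, cl, ia)

def parse_kingdom_config_py (text : String) : List String × (List (String × List String)) :=
  let fin := (PySem.Str.splitlines text).foldl pvA_step ([], PySem.Dict.empty, none, false)
  (fin.1, fin.2.1.items)

-- ===== PORT B =====
-- keep the line? (not blank, not a comment)
def pvB_keep (l : String) : Bool :=
  !(PySem.Str.strip l == "") && !(PySem.Str.startswith (PySem.Str.lstrip l) "#")

-- "- " item test and card-name normalisation (Source B's _card)
def pvB_item (l : String) : Bool := PySem.Str.startswith (PySem.Str.strip l) "- "

def pvB_card (l : String) : String :=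
  PySem.Str.stripChars (PySem.Str.strip (PySem.Str.slice (PySem.Str.strip l) (some 2) none)) "\""

def pvB_isAltHeader (l : String) : Bool :=
  PySem.Str.startswith (PySem.Str.strip l) "alternative_kingdoms:"

-- Source B's sectioning loop: accumulate the current section (flag, body), flush on a
-- non-indented line, flush once more at the end
def pvB_sections : List String → Bool → List String → List (Bool × List String)
  | [], flag, body => [(flag, body)]
  | l :: ls, flag, body =>
    if !(PySem.Str.startswith l " ") then (flag, body) :: pvB_sections ls (pvB_isAltHeader l) []
    else pvB_sections ls flag (body ++ [l])

-- Source B's _parse_alt_section loop body (state: alternatives, current)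
def pvB_altStep (st : PySem.Dict String (List String) × Option String) (l : String) :
    PySem.Dict String (List String) × Option String :=
  match st with
  | (al, cur) =>
    if PySem.Str.startswith l "  " && !(PySem.Str.startswith l "    ") then
      (al.insert (PySem.Str.slice (PySem.Str.strip l) none (some (-1))) [],
       some (PySem.Str.slice (PySem.Str.strip l) none (some (-1))))
    else if pvB_item l then
      match cur with
      | some nm => (al.modify nm [] (· ++ [pvB_card l]), some nm)
      | none => (al, cur)
    else (al, cur)

def parse_kingdom_config_py_alt (text : String) : List String × (List (String × List String)) :=
  let lines := (PySem.Str.splitlines text).filter pvB_keep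
  let secs := pvB_sections lines false []
  let defaults := secs.foldl (fun acc s => if s.1 then acc else acc ++ (s.2.filter pvB_item).map pvB_card) []
  let alts := secs.foldl (fun al s => if s.1 then (s.2.foldl pvB_altStep (al, none)).1 else al) PySem.Dict.empty
  (defaults, alts.items)

-- ===== PRECONDITION & SPEC =====
def Spec_parse_kingdom_config_py (text : String) (out : List String × (List (String × List String))) : Prop := out = parse_kingdom_config_py_alt text
instance (text : String) (out : List String × (List (String × List String))) : Decidable (Spec_parse_kingdom_config_py text out) := by unfold Spec_parse_kingdom_config_py; infer_instance

-- ===== CLAIM (what is proved, stated in full; the proofs are below) =====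
def Claim_equal_parse_kingdom_config_py : Prop := ∀ (text : String), Dom_parse_kingdom_config_py text → Spec_parse_kingdom_config_py text (parse_kingdom_config_py text)

-- ===== LEMMAS AND PROOFS =====

-- A's skip branch is the complement of B's keep filter
lemma pvSkip_eq (l : String) :
    ((PySem.Str.strip l == "") || PySem.Str.startswith (PySem.Str.lstrip l) "#") = !pvB_keep l := by
  simp [pvB_keep]

-- folding A's step over all lines = folding it over the kept lines
lemma pvFoldFilter : ∀ (ls : List String) st,
    ls.foldl pvA_step st = (ls.filter pvB_keep).foldl pvA_step st := by
  intro ls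
  induction ls with
  | nil => intro st; rfl
  | cons l ls ih =>
    intro st
    by_cases hk : pvB_keep l = true
    · simp [hk, List.foldl_cons, ih]
    · have hs : ((PySem.Str.strip l == "") || PySem.Str.startswith (PySem.Str.lstrip l) "#") = true := by
        rw [pvSkip_eq]; simp [Bool.not_eq_true] at hk; simp [hk]
      have hstep : pvA_step st l = st := by
        obtain ⟨d, alts, cl, ia⟩ := st
        simp only [pvA_step]
        rw [hs]
        simp
      simp only [Bool.not_eq_true] at hk
      rw [List.foldl_cons, hstep, ih]
      simp [hk]

-- the two header prefixes are mutually exclusive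
lemma pvHead_excl (s : String) (h : PySem.Str.startswith s "kingdom_cards:" = true) :
    PySem.Str.startswith s "alternative_kingdoms:" = false := by
  by_contra hc
  simp only [Bool.not_eq_false] at hc
  have h1 : ("kingdom_cards:".toList) <+: s.toList := by
    have := h; simp only [PySem.Str.startswith_eq] at this
    exact (PySem.Chars.startswith_iff _ _).1 this
  have h2 : ("alternative_kingdoms:".toList) <+: s.toList := by
    have := hc; simp only [PySem.Str.startswith_eq] at this
    exact (PySem.Chars.startswith_iff _ _).1 this
  rcases List.prefix_or_prefix_of_prefix h1 h2 with hp | hp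
  · exact absurd hp (by decide)
  · exact absurd hp (by decide)

-- shape of the sectioning result: the first section carries the pending body in front
lemma pvSections_shape : ∀ (ls : List String) (flag : Bool) (body : List String),
    ∃ b r, pvB_sections ls flag body = (flag, body ++ b) :: r ∧
           pvB_sections ls flag [] = (flag, b) :: r := by
  intro ls
  induction ls with
  | nil => intro flag body; exact ⟨[], [], by simp [pvB_sections], by simp [pvB_sections]⟩
  | cons l ls ih =>
    intro flag body
    by_cases hh : PySem.Str.startswith l " " = true
    · -- indented: the line joins the pending body
      obtain ⟨b, r, h1, h0⟩ := ih flag (body ++ [l])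
      obtain ⟨b', r', h1', h0'⟩ := ih flag [l]
      have h00 := h0.symm.trans h0'
      injection h00 with hhd htl
      injection hhd with _ hb
      subst hb; subst htl
      refine ⟨l :: b, r, ?_, ?_⟩
      · have hstep : pvB_sections (l :: ls) flag body = pvB_sections ls flag (body ++ [l]) := by
          rw [pvB_sections, hh]; rfl
        rw [hstep, h1]; simp
      · have hstep : pvB_sections (l :: ls) flag [] = pvB_sections ls flag [l] := by
          rw [pvB_sections, hh]; rfl
        rw [hstep, h1']
        rfl
    · -- header: current section is flushed as-is
      rw [Bool.not_eq_true] at hh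
      refine ⟨[], pvB_sections ls (pvB_isAltHeader l) [], ?_, ?_⟩ <;>
        (rw [pvB_sections, hh]; simp)

-- defaults of a section list
def pvDefs : List (Bool × List String) → List String
  | [] => []
  | (f, b) :: r => (if f then [] else (b.filter pvB_item).map pvB_card) ++ pvDefs r

-- alternatives of a section list, with the  current-alt seed for the first section
def pvAltRun : PySem.Dict String (List String) → Option String → List (Bool × List String) →
    PySem.Dict String (List String)
  | al, _, [] => al
  | al, cur, (f, b) :: r => pvAltRun (if f then (b.foldl pvB_altStep (al, cur)).1 else al) none r

def pvCl2cur : Option (Option String) → Option String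
  | some (some nm) => some nm
  | _ => none

lemma pvDefs_foldl : ∀ (secs : List (Bool × List String)) (a : List String),
    secs.foldl (fun acc s => if s.1 then acc else acc ++ (s.2.filter pvB_item).map pvB_card) a
      = a ++ pvDefs secs := by
  intro secs
  induction secs with
  | nil => intro a; simp [pvDefs]
  | cons s r ih =>
    intro a
    obtain ⟨f, b⟩ := s
    by_cases hf : f = true <;> simp [pvDefs, hf, ih, List.append_assoc]

lemma pvAltRun_foldl : ∀ (secs : List (Bool × List String)) (al : PySem.Dict String (List String)),
    secs.foldl (fun al s => if s.1 then (s.2.foldl pvB_altStep (al, none)).1 else al) al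
      = pvAltRun al none secs := by
  intro secs
  induction secs with
  | nil => intro al; rfl
  | cons s r ih => intro al; obtain ⟨f, b⟩ := s; simp [pvAltRun, ih]

-- main invariant: A's fold over kept lines computes B's grouped harvest
lemma pvMain : ∀ (ls : List String) (d : List String) (al : PySem.Dict String (List String))
    (cl : Option (Option String)) (ia : Bool),
    (∀ l ∈ ls, pvB_keep l = true) → (ia = true → cl ≠ some none) →
    (ls.foldl pvA_step (d, al, cl, ia)).1 = d ++ pvDefs (pvB_sections ls ia []) ∧
    (ls.foldl pvA_step (d, al, cl, ia)).2.1 = pvAltRun al (pvCl2cur cl) (pvB_sections ls ia []) := by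
  intro ls
  induction ls with
  | nil =>
    intro d al cl ia _ _
    constructor
    · cases ia <;> simp [pvB_sections, pvDefs]
    · cases ia <;> simp [pvB_sections, pvAltRun]
  | cons l ls ih =>
    intro d al cl ia hkeep hok
    have hkl : pvB_keep l = true := hkeep l (by simp)
    have hkls : ∀ x ∈ ls, pvB_keep x = true := fun x hx => hkeep x (List.mem_cons_of_mem _ hx)
    have hskip : (PySem.Str.strip l == "" || PySem.Str.startswith (PySem.Str.lstrip l) "#") = false := by
      rw [pvSkip_eq, hkl]; rfl
    by_cases hh : PySem.Str.startswith l " " = true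
    · -- indented line
      obtain ⟨b, r, hS, hS0⟩ := pvSections_shape ls ia [l]
      have hsec : pvB_sections (l :: ls) ia [] = (ia, l :: b) :: r := by
        have h' : pvB_sections (l :: ls) ia [] = pvB_sections ls ia [l] := by
          rw [pvB_sections, hh]; rfl
        rw [h', hS]; rfl
      cases ia with
      | false =>
        by_cases hit : PySem.Str.startswith (PySem.Str.strip l) "- " = true
        · have hit' : pvB_item l = true := hit
          have hstep : pvA_step (d, al, cl, false) l = (d ++ [pvB_card l], al, cl, false) := by
            simp only [pvA_step, hskip, hh, hit]; simp [pvB_card]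
          obtain ⟨hd1, hd2⟩ := ih (d ++ [pvB_card l]) al cl false hkls (by simp)
          rw [List.foldl_cons, hstep]
          refine ⟨?_, ?_⟩
          · rw [hd1, hS0, hsec]
            simp only [pvDefs, List.filter_cons, hit']
            simp
          · rw [hd2, hS0, hsec]; simp [pvAltRun]
        · rw [Bool.not_eq_true] at hit
          have hit' : pvB_item l = false := hit
          have hstep : pvA_step (d, al, cl, false) l = (d, al, cl, false) := by
            simp only [pvA_step, hskip, hh, hit]; simp
          obtain ⟨hd1, hd2⟩ := ih d al cl false hkls (by simp)
          rw [List.foldl_cons, hstep]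
          refine ⟨?_, ?_⟩
          · rw [hd1, hS0, hsec]
            simp only [pvDefs, List.filter_cons, hit']
            simp
          · rw [hd2, hS0, hsec]; simp [pvAltRun]
      | true =>
        by_cases hnm : (PySem.Str.startswith l "  " && !(PySem.Str.startswith l "    ")) = true
        · -- alternative-kingdom name line
          have hstep : pvA_step (d, al, cl, true) l =
              (d, al.insert (PySem.Str.slice (PySem.Str.strip l) none (some (-1))) [],
               some (some (PySem.Str.slice (PySem.Str.strip l) none (some (-1)))), true) := by
            simp only [pvA_step, hskip, hh, hnm]; simp
          obtain ⟨hd1, hd2⟩ :=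
            ih d (al.insert (PySem.Str.slice (PySem.Str.strip l) none (some (-1))) [])
              (some (some (PySem.Str.slice (PySem.Str.strip l) none (some (-1))))) true hkls
              (by intro _ h; simp at h)
          rw [List.foldl_cons, hstep]
          refine ⟨?_, ?_⟩
          · rw [hd1, hS0, hsec]; simp [pvDefs]
          · rw [hd2, hS0, hsec]
            simp only [pvAltRun, if_true, List.foldl_cons, pvB_altStep, hnm]
            simp [pvCl2cur]
        · rw [Bool.not_eq_true] at hnm
          by_cases hit : PySem.Str.startswith (PySem.Str.strip l) "- " = true
          · have hit' : pvB_item l = true := hit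
            -- item line inside alternatives
            match cl, hok with
            | none, _ =>
              have hstep : pvA_step (d, al, none, true) l = (d, al, none, true) := by
                simp only [pvA_step, hskip, hh, hnm, hit]; simp
              obtain ⟨hd1, hd2⟩ := ih d al none true hkls (by intro _ h; simp at h)
              rw [List.foldl_cons, hstep]
              refine ⟨?_, ?_⟩
              · rw [hd1, hS0, hsec]; simp [pvDefs]
              · rw [hd2, hS0, hsec]
                simp only [pvAltRun, if_true, List.foldl_cons, pvB_altStep, hnm, hit']
                simp [pvCl2cur]
            | some none, hok => exact absurd rfl (hok rfl)
            | some (some nm), _ =>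
              have hstep : pvA_step (d, al, some (some nm), true) l =
                  (d, al.modify nm [] (· ++ [pvB_card l]), some (some nm), true) := by
                simp only [pvA_step, hskip, hh, hnm, hit]; simp [pvB_card]
              obtain ⟨hd1, hd2⟩ := ih d (al.modify nm [] (· ++ [pvB_card l])) (some (some nm)) true
                hkls (by intro _ h; simp at h)
              rw [List.foldl_cons, hstep]
              refine ⟨?_, ?_⟩
              · rw [hd1, hS0, hsec]; simp [pvDefs]
              · rw [hd2, hS0, hsec]
                simp only [pvAltRun, if_true, List.foldl_cons, pvB_altStep, hnm, hit']
                simp [pvCl2cur]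
          · -- neither: ignored by both
            rw [Bool.not_eq_true] at hit
            have hit' : pvB_item l = false := hit
            have hstep : pvA_step (d, al, cl, true) l = (d, al, cl, true) := by
              simp only [pvA_step, hskip, hh, hnm, hit]; simp
            obtain ⟨hd1, hd2⟩ := ih d al cl true hkls hok
            rw [List.foldl_cons, hstep]
            refine ⟨?_, ?_⟩
            · rw [hd1, hS0, hsec]; simp [pvDefs]
            · rw [hd2, hS0, hsec]
              simp only [pvAltRun, if_true, List.foldl_cons, pvB_altStep, hnm, hit']
              simp
    · -- top-level header line
      rw [Bool.not_eq_true] at hh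
      by_cases hkc : PySem.Str.startswith (PySem.Str.strip l) "kingdom_cards:" = true
      · have ha : pvB_isAltHeader l = false := by
          unfold pvB_isAltHeader; exact pvHead_excl _ hkc
        have hstep : pvA_step (d, al, cl, ia) l = (d, al, some none, false) := by
          simp only [pvA_step, hskip, hh, hkc]; simp
        have hsec : pvB_sections (l :: ls) ia [] = (ia, []) :: pvB_sections ls false [] := by
          rw [pvB_sections, hh, ha]; rfl
        obtain ⟨hd1, hd2⟩ := ih d al (some none) false hkls (by simp)
        rw [List.foldl_cons, hstep]
        refine ⟨?_, ?_⟩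
        · rw [hd1, hsec]; cases ia <;> simp [pvDefs]
        · rw [hd2, hsec]; cases ia <;> simp [pvAltRun, pvCl2cur]
      · rw [Bool.not_eq_true] at hkc
        have hstep : pvA_step (d, al, cl, ia) l = (d, al, none, pvB_isAltHeader l) := by
          simp only [pvA_step, hskip, hh, hkc]; simp [pvB_isAltHeader]
        have hsec : pvB_sections (l :: ls) ia [] = (ia, []) :: pvB_sections ls (pvB_isAltHeader l) [] := by
          rw [pvB_sections, hh]; rfl
        obtain ⟨hd1, hd2⟩ := ih d al none (pvB_isAltHeader l) hkls (by simp)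
        rw [List.foldl_cons, hstep]
        refine ⟨?_, ?_⟩
        · rw [hd1, hsec]; cases ia <;> simp [pvDefs]
        · rw [hd2, hsec]; cases ia <;> simp [pvAltRun, pvCl2cur]

-- ===== VERDICT (by name: the statement is the Claim_ definition above) =====
theorem parse_kingdom_config_py_spec : Claim_equal_parse_kingdom_config_py := by
  intro text _
  unfold Spec_parse_kingdom_config_py parse_kingdom_config_py parse_kingdom_config_py_alt
  have hkeep : ∀ l ∈ (PySem.Str.splitlines text).filter pvB_keep, pvB_keep l = true := by
    intro l hl; exact (List.mem_filter.1 hl).2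
  have h := pvMain ((PySem.Str.splitlines text).filter pvB_keep) [] PySem.Dict.empty none false
    hkeep (by simp)
  rw [pvFoldFilter]
  simp only [pvDefs_foldl, pvAltRun_foldl]
  exact Prod.ext (by simpa using h.1) (by simp [h.2, pvCl2cur])
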